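-- pv_equiv track=rewrite | github.com/MolSSI/covid | schema/validation.py | prevent_unhandled_subdomains
-- ===== SOURCE A (Python) =====
-- from typing import Optional, List, Union, Dict, AnyStr
-- from enum import Enum
--
-- class ValidProteins(str, Enum):
--     antibody = 'antibody'
--     spike = 'spike'
--     RBD = 'RBD'
--     S1 = 'S1'
--     S2 = 'S2'
--     ACE2 = 'ACE2'
--     NSP1 = 'NSP1'
--     NSP2 = 'NSP2'
--     NSP4 = 'NSP4'
--     NSP6 = 'NSP6'
--     NSP7 = 'NSP7'
--     NSP8 = 'NSP8'
--     NSP9 = 'NSP9'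
--     NSP10 = 'NSP10'
--     NSP11 = 'NSP11'
--     RdRP = 'RdRP'
--     Helicase = 'Helicase'
--     NSP14 = 'NSP14'
--     NSP15 = 'NSP15'
--     NSP16 = 'NSP16'
--     fusion_core = 'fusion core'
--     HR1 = 'HR1'
--     HR2 = 'HR2'
--     TMPRSS2 = 'TMPRSS2'
--     Mpro = '3CLpro'
--     PLpro = 'PLpro'
--     Macrodomain = 'Macrodomain'
--     BoAT1 = 'BoAT1'
--     FcR = 'Fc receptor'
--     Furin = 'Furin'
--     IL6R = 'IL6R'
--     p38 = 'p38'
--     ORF3a = 'ORF3a'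
--     ORF6 = 'ORF6'
--     ORF7b = 'ORF7b'
--     ORF7a = 'ORF7a'
--     ORF8 = 'ORF8'
--     ORF10 = 'ORF10'
--     M_protein = 'M protein'
--     N_protein = 'N protein'
--     E_protein = 'E protein'
--     PD_1 = 'PD-1'
--     virion = "virion"
--
-- def prevent_unhandled_subdomains(proteins: List[str]) -> List[str]:
--     unhandled_subdomains = {
--         ValidProteins.RBD: ValidProteins.spike,
--         ValidProteins.S1: ValidProteins.spike,
--         ValidProteins.S2: ValidProteins.spike
--     }
--
--     base_error = ("Subdomain proteins are not correctly implemented yet. At least 1 protein listed was a subdomain.{}"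
--                   "Please use the base protein instead (e.g. RBD -> spike).")
--     caught_subdomains = []
--
--     for protein in proteins:
--         if protein in unhandled_subdomains:
--             parent = unhandled_subdomains[protein]
--             if parent not in proteins:
--                 caught_subdomains.append(protein)
--         else:
--             # There is at least some protein known
--             # Reset the building list
--             caught_subdomains = []
--             break
--     if caught_subdomains:
--         str_caught_subdomains = "\n\t- " + "\n\t- ".join(caught_subdomains) + "\n"
--         full_error = base_error.format(str_caught_subdomains)
--         raise ValueError(full_error)
--     return proteins
-- ===== SOURCE B (Python) =====
-- def prevent_unhandled_subdomains(proteins):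
--     parent_of = {'RBD': 'spike', 'S1': 'spike', 'S2': 'spike'}
--     # Set-based validation: the list is all-subdomain iff removing the known
--     # subdomain keys from its element set leaves nothing.
--     if proteins and not set(proteins).difference(parent_of):
--         listing = "\n\t- " + "\n\t- ".join(proteins) + "\n"
--         raise ValueError(
--             "Subdomain proteins are not correctly implemented yet. At least 1 protein listed was a subdomain."
--             + listing
--             + "Please use the base protein instead (e.g. RBD -> spike).")
--     return proteins
-- ===== Notes on version B (the rewrite author's own statement) =====
-- stated objective: simpler
-- what changed: Replaces A's per-element accumulate-reset-and-break loop over the list with a set-difference test: build set(proteins), subtract the subdomain keys, and raise only if the difference is empty (and the list nonempty); no per-element accumulator or caught-list construction remains.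
import Mathlib
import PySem

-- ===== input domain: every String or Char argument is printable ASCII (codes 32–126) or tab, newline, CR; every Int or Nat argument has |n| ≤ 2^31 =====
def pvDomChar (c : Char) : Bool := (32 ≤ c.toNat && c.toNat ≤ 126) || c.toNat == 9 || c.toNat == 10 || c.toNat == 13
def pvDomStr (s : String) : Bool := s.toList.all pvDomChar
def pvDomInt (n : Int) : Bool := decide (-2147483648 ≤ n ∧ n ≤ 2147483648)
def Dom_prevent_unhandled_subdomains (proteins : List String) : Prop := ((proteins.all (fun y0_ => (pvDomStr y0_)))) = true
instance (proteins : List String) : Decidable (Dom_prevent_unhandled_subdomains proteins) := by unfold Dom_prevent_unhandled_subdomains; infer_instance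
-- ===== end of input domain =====

-- B replaces A's per-element accumulate-reset-and-break loop with a set-difference test
-- (set(proteins) minus the subdomain keys) deciding whether to raise (simpler); the
-- equivalence is about the returned value on inputs where A returns normally (Pre_
-- excludes exactly the inputs on which A raises ValueError; B raises there too, with
-- the same message).

-- ===== PORT A =====
-- the dict {RBD: spike, S1: spike, S2: spike}
def pvUnhandledA : PySem.Dict String String :=
  PySem.Dict.ofList [("RBD", "spike"), ("S1", "spike"), ("S2", "spike")]

-- the 'for protein in proteins' loop with its reset-and-break branch
def pvLoopA (proteins : List String) : List String → List String → List String
  | [], acc => acc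
  | p :: rest, acc =>
    match PySem.Dict.get? pvUnhandledA p with
    | some parent =>
        pvLoopA proteins rest (if parent ∈ proteins then acc else acc ++ [p])
    | none => []          -- reset the building list and break

def prevent_unhandled_subdomains (proteins : List String) : List String :=
  let caught_subdomains := pvLoopA proteins proteins []
  if caught_subdomains ≠ [] then []   -- raise ValueError(full_error): excluded by Pre_
  else proteins

-- ===== PORT B =====
def pvParentOf : PySem.Dict String String :=
  PySem.Dict.ofList [("RBD", "spike"), ("S1", "spike"), ("S2", "spike")]

def prevent_unhandled_subdomains_alt (proteins : List String) : List String :=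
  if !proteins.isEmpty
      && (PySem.Set.diff (PySem.Set.ofList proteins) (PySem.Dict.keys pvParentOf)).isEmpty then
    []   -- raise ValueError(...): excluded by Pre_
  else proteins

-- ===== PRECONDITION & SPEC =====
-- Pre_ excludes exactly the inputs on which A raises ValueError (a nonempty list whose every
-- element is one of the subdomain keys "RBD"/"S1"/"S2"); B raises the same error there.
def Pre_prevent_unhandled_subdomains (proteins : List String) : Prop :=
  ¬ (proteins ≠ [] ∧ ∀ p ∈ proteins, p ∈ (["RBD", "S1", "S2"] : List String))
instance (proteins : List String) : Decidable (Pre_prevent_unhandled_subdomains proteins) := by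
  unfold Pre_prevent_unhandled_subdomains; infer_instance

def pvWitness_prevent_unhandled_subdomains : List String := ["spike", "RBD"]

def Spec_prevent_unhandled_subdomains (proteins : List String) (out : List String) : Prop := out = prevent_unhandled_subdomains_alt proteins
instance (proteins : List String) (out : List String) : Decidable (Spec_prevent_unhandled_subdomains proteins out) := by unfold Spec_prevent_unhandled_subdomains; infer_instance

-- ===== CLAIM (what is proved, stated in full; the proofs are below) =====
def Claim_equal_prevent_unhandled_subdomains : Prop := ∀ (proteins : List String), Dom_prevent_unhandled_subdomains proteins → Pre_prevent_unhandled_subdomains proteins → Spec_prevent_unhandled_subdomains proteins (prevent_unhandled_subdomains proteins)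

-- ===== LEMMAS AND PROOFS =====

theorem pv_get?_isSome_iff (p : String) :
    (PySem.Dict.get? pvUnhandledA p).isSome = true ↔ p ∈ (["RBD", "S1", "S2"] : List String) := by
  have hd : pvUnhandledA = PySem.Dict.mk [("RBD", "spike"), ("S1", "spike"), ("S2", "spike")] := by
    decide
  rw [hd]
  by_cases h1 : p = "RBD" <;> by_cases h2 : p = "S1" <;> by_cases h3 : p = "S2" <;>
    simp [h1, h2, h3, PySem.Dict.get?]
  exact ⟨fun h => h1 h.symm, fun h => h2 h.symm, fun h => h3 h.symm⟩

theorem pv_keys_parentOf : PySem.Dict.keys pvParentOf = ["RBD", "S1", "S2"] := by decide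

-- the break branch: a non-key element anywhere in the remainder forces the loop result []
theorem pvLoopA_break (proteins : List String) :
    ∀ (rem acc : List String), (∃ p ∈ rem, p ∉ (["RBD", "S1", "S2"] : List String)) →
      pvLoopA proteins rem acc = [] := by
  intro rem
  induction rem with
  | nil => intro acc h; simp at h
  | cons p rest ih =>
    intro acc h
    rcases h with ⟨q, hq, hqn⟩
    rcases List.mem_cons.mp hq with hq | hq
    · subst hq
      have : (PySem.Dict.get? pvUnhandledA q).isSome = false := by
        rw [Bool.eq_false_iff]
        intro hs
        exact hqn ((pv_get?_isSome_iff q).mp hs)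
      cases hg : PySem.Dict.get? pvUnhandledA q with
      | none => simp [pvLoopA, hg]
      | some v => rw [hg] at this; simp at this
    · cases hg : PySem.Dict.get? pvUnhandledA p with
      | none => simp [pvLoopA, hg]
      | some v => simp [pvLoopA, hg]; exact ih _ ⟨q, hq, hqn⟩

-- ===== VERDICT (by name: the statement is the Claim_ definition above) =====
theorem prevent_unhandled_subdomains_spec : Claim_equal_prevent_unhandled_subdomains := by
  intro proteins _ hpre
  unfold Spec_prevent_unhandled_subdomains
  unfold Pre_prevent_unhandled_subdomains at hpre
  push Not at hpre
  by_cases hnil : proteins = []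
  · subst hnil; rfl
  · obtain ⟨q, hq, hqn⟩ := hpre hnil
    have hA : prevent_unhandled_subdomains proteins = proteins := by
      unfold prevent_unhandled_subdomains
      rw [pvLoopA_break proteins proteins [] ⟨q, hq, hqn⟩]
      simp
    have hB : prevent_unhandled_subdomains_alt proteins = proteins := by
      unfold prevent_unhandled_subdomains_alt
      have hmem : q ∈ PySem.Set.diff (PySem.Set.ofList proteins) (PySem.Dict.keys pvParentOf) := by
        rw [PySem.Set.mem_diff, pv_keys_parentOf]
        exact ⟨(PySem.Set.mem_ofList _ _).mpr hq, hqn⟩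
      have : (PySem.Set.diff (PySem.Set.ofList proteins) (PySem.Dict.keys pvParentOf)).isEmpty = false := by
        rw [List.isEmpty_eq_false_iff_exists_mem]
        exact ⟨q, hmem⟩
      simp [this]
    rw [hA, hB]
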